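-- pv_equiv track=rewrite | github.com/raeez/chiral-bar-cobar | compute/lib/ordered_bar_descent_engine.py | factorization_coproduct
-- ===== SOURCE A (Python) =====
-- from typing import Dict, List, Optional, Tuple
--
-- def factorization_coproduct(word_set: frozenset) -> List[Tuple[frozenset, frozenset]]:
--     """Factorization coproduct: all subset partitions.
--
--     Returns list of (S, T) pairs where S sqcup T = word_set.
--     This is cocommutative: (S,T) and (T,S) represent the same term.
--     """
--     elements = sorted(word_set)
--     n = len(elements)
--     result = []
--     for mask in range(2 ** n):
--         S = frozenset(elements[i] for i in range(n) if mask & (1 << i))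
--         T = word_set - S
--         result.append((S, T))
--     return result
-- ===== SOURCE B (Python) =====
-- def factorization_coproduct(word_set):
--     """Same subset-partition list, built by doubling the power set instead of bitmask tests."""
--     subsets = [frozenset()]
--     for e in sorted(word_set):
--         subsets = subsets + [s | {e} for s in subsets]
--     return [(S, word_set - S) for S in subsets]
-- ===== Notes on version B (the rewrite author's own statement) =====
-- stated objective: alternative
-- what changed: Replaces the 2^n bitmask loop with per-mask bit tests by an incremental power-set doubling: start from [emptyset] and, for each sorted element, append the with-element copies of the current list; no bit arithmetic remains.
import Mathlib
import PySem

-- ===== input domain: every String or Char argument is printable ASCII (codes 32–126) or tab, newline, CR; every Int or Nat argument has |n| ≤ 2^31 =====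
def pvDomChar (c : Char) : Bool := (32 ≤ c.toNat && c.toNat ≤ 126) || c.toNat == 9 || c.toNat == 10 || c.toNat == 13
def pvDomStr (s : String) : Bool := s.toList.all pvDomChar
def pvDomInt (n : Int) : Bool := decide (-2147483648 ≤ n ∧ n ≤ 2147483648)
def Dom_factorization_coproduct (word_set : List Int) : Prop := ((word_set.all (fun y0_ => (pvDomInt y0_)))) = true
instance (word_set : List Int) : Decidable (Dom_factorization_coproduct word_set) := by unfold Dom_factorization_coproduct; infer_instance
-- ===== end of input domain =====

-- B builds the power set by incremental doubling instead of A's bitmask loop (objective: alternative; same cost).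
-- Frozensets are represented as lists of distinct elements (S in sorted order, T in word_set order); compared as sets.

-- ===== PORT A =====
-- helper of port A: S for a given mask — frozenset(elements[i] for i in range(n) if mask & (1 << i))
def pvMaskSub (elems : List Int) (mask : Nat) : List Int :=
  (List.range elems.length).filterMap (fun i =>
    if mask &&& (1 <<< i) ≠ 0 then elems[i]? else none)

def factorization_coproduct (word_set : List Int) : List (List Int × List Int) :=
  let elements := PySem.List.sorted word_set (fun x => x) false
  let n := elements.length
  (List.range (2 ^ n)).foldl
    (fun result mask =>
      let S := pvMaskSub elements mask
      let T := word_set.filter (fun x => decide (x ∉ S))   -- word_set - S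
      result ++ [(S, T)]) []

-- ===== PORT B =====
-- helper of port B: the power-set doubling loop over the sorted elements
def pvPow (elems : List Int) : List (List Int) :=
  elems.foldl (fun acc e => acc ++ acc.map (fun s => s ++ [e])) [[]]

def factorization_coproduct_alt (word_set : List Int) : List (List Int × List Int) :=
  let subsets := pvPow (PySem.List.sorted word_set (fun x => x) false)
  subsets.map (fun S => (S, word_set.filter (fun x => decide (x ∉ S))))

-- ===== PRECONDITION & SPEC =====
def Spec_factorization_coproduct (word_set : List Int) (out : List (List Int × List Int)) : Prop := out = factorization_coproduct_alt word_set
instance (word_set : List Int) (out : List (List Int × List Int)) : Decidable (Spec_factorization_coproduct word_set out) := by unfold Spec_factorization_coproduct; infer_instance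

-- ===== CLAIM (what is proved, stated in full; the proofs are below) =====
def Claim_equal_factorization_coproduct : Prop := ∀ (word_set : List Int), Dom_factorization_coproduct word_set → Spec_factorization_coproduct word_set (factorization_coproduct word_set)

-- ===== LEMMAS AND PROOFS =====

-- appending-snoc foldl is a map
theorem pv_foldl_snoc_eq_map {α β : Type} (f : α → β) (l : List α) (acc : List β) :
    l.foldl (fun r m => r ++ [f m]) acc = acc ++ l.map f := by
  induction l generalizing acc with
  | nil => simp
  | cons x xs ih => simp [List.foldl_cons, ih]

theorem pv_and_pow_ne_iff (mask i : Nat) :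
    (mask &&& (1 <<< i) ≠ 0) ↔ mask.testBit i := by
  rw [Nat.one_shiftLeft, Nat.and_two_pow]
  cases h : mask.testBit i <;> simp

-- bit n of a mask below 2^n is clear, so index n contributes nothing
theorem pvMaskSub_append_lo (l : List Int) (e : Int) (mask : Nat) (hm : mask < 2 ^ l.length) :
    pvMaskSub (l ++ [e]) mask = pvMaskSub l mask := by
  unfold pvMaskSub
  rw [List.length_append, List.length_cons, List.length_nil, List.range_succ,
    List.filterMap_append]
  have hbit : mask.testBit l.length = false := Nat.testBit_lt_two_pow hm
  have h2 : List.filterMap (fun i =>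
      if mask &&& (1 <<< i) ≠ 0 then (l ++ [e])[i]? else none) [l.length] = [] := by
    simp [List.filterMap, pv_and_pow_ne_iff, hbit]
  rw [h2, List.append_nil]
  apply List.filterMap_congr
  intro i hi
  have hi' : i < l.length := List.mem_range.mp hi
  rw [List.getElem?_append_left hi']

-- masks 2^n + m pick up e as the new last element
theorem pvMaskSub_append_hi (l : List Int) (e : Int) (m : Nat) (hm : m < 2 ^ l.length) :
    pvMaskSub (l ++ [e]) (2 ^ l.length + m) = pvMaskSub l m ++ [e] := by
  unfold pvMaskSub
  rw [List.length_append, List.length_cons, List.length_nil, List.range_succ,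
    List.filterMap_append]
  have hbit : (2 ^ l.length + m).testBit l.length = true := by
    rw [Nat.testBit_two_pow_add_eq, Nat.testBit_lt_two_pow hm]
    rfl
  have h2 : List.filterMap (fun i =>
      if (2 ^ l.length + m) &&& (1 <<< i) ≠ 0 then (l ++ [e])[i]? else none) [l.length] = [e] := by
    simp [List.filterMap, pv_and_pow_ne_iff, hbit]
  rw [h2]
  congr 1
  apply List.filterMap_congr
  intro i hi
  have hi' : i < l.length := List.mem_range.mp hi
  rw [List.getElem?_append_left hi']
  have hb : (2 ^ l.length + m).testBit i = m.testBit i :=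
    Nat.testBit_two_pow_add_gt hi' m
  by_cases h : m.testBit i
  · simp [pv_and_pow_ne_iff, hb, h]
  · simp [pv_and_pow_ne_iff, hb, h]

-- the bitmask enumeration equals the doubling power set
theorem pv_masks_eq_pow (elems : List Int) :
    (List.range (2 ^ elems.length)).map (pvMaskSub elems) = pvPow elems := by
  induction elems using List.reverseRecOn with
  | nil => simp [pvMaskSub, pvPow]
  | append_singleton l e ih =>
    have hlen : (l ++ [e]).length = l.length + 1 := by simp
    rw [hlen, pow_succ, Nat.mul_two, List.range_add, List.map_append, List.map_map]
    have h1 : (List.range (2 ^ l.length)).map (pvMaskSub (l ++ [e]))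
        = (List.range (2 ^ l.length)).map (pvMaskSub l) := by
      apply List.map_congr_left
      intro m hm
      exact pvMaskSub_append_lo l e m (List.mem_range.mp hm)
    have h2 : (List.range (2 ^ l.length)).map (pvMaskSub (l ++ [e]) ∘ (fun m => 2 ^ l.length + m))
        = ((List.range (2 ^ l.length)).map (pvMaskSub l)).map (fun s => s ++ [e]) := by
      rw [List.map_map]
      apply List.map_congr_left
      intro m hm
      exact pvMaskSub_append_hi l e m (List.mem_range.mp hm)
    rw [h1, h2, ih]
    unfold pvPow
    rw [List.foldl_append]
    simp

-- ===== VERDICT (by name: the statement is the Claim_ definition above) =====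
theorem factorization_coproduct_spec : Claim_equal_factorization_coproduct := by
  intro word_set _
  unfold Spec_factorization_coproduct factorization_coproduct factorization_coproduct_alt
  rw [pv_foldl_snoc_eq_map]
  rw [← pv_masks_eq_pow, List.map_map]
  simp
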